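-- pv_equiv track=rewrite | github.com/jo102tz/LibReDE-SARDE-data | librede-parsing/parse.py | count_dict
-- ===== SOURCE A (Python) =====
-- TS_DIVISION_FACTOR = 1000000000
--
-- def count_dict(wc_ts_dict):
--     ret_dict = {}
--     for wc, ts_dict in wc_ts_dict.items():
--         for ts in ts_dict.keys():
--             ts = int(ts/TS_DIVISION_FACTOR)
--             if ts not in ret_dict:
--                 ret_dict[ts] = {}
--             if wc not in ret_dict[ts]:
--                 ret_dict[ts][wc] = 0
--             ret_dict[ts][wc] = ret_dict[ts][wc]+1
--     return ret_dict, list(wc_ts_dict.keys())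
-- ===== SOURCE B (Python) =====
-- TS_DIVISION_FACTOR = 1000000000
--
-- def count_dict(wc_ts_dict):
--     # Pass 1: flat counter keyed by (scaled-ts, workload-class).
--     flat = {}
--     for wc, ts_dict in wc_ts_dict.items():
--         for ts in ts_dict:
--             key = (int(ts / TS_DIVISION_FACTOR), wc)
--             flat[key] = flat.get(key, 0) + 1
--     # Pass 2: reshape the flat counter into the nested dict.
--     ret_dict = {}
--     for (t, wc), c in flat.items():
--         if t not in ret_dict:
--             ret_dict[t] = {}
--         ret_dict[t][wc] = c
--     return ret_dict, list(wc_ts_dict)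
-- ===== Notes on version B (the rewrite author's own statement) =====
-- stated objective: alternative
-- what changed: Replaces A's fused nested-dict build with two passes: a flat counter keyed by (scaled_ts, wc) tuples, then a reshape of the flat counter's items into the nested dict.
import Mathlib
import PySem

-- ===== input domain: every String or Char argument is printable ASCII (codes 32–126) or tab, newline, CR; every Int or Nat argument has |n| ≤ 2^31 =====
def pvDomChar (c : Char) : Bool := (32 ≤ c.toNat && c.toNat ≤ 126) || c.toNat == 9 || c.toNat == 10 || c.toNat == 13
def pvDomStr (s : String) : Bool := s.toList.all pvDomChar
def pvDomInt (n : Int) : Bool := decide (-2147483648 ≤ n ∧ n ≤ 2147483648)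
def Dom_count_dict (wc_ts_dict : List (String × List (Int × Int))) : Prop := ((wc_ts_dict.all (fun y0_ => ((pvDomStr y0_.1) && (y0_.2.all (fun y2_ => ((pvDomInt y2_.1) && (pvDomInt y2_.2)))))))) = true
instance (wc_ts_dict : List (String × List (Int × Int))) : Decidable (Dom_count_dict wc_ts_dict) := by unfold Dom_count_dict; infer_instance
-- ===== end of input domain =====

-- B replaces A's fused nested-dict build by a flat (scaled_ts, wc)-keyed counter pass
-- followed by a reshape pass into the nested dict (alternative decomposition, same cost).

-- assoc-list primitives shared by both ports (Python dict lookup / item assignment: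
-- first matching key; assignment overwrites in place, new keys append)
def alGet? {α β : Type} [DecidableEq α] : List (α × β) → α → Option β
  | [], _ => none
  | p :: r, x => if p.1 = x then some p.2 else alGet? r x

def alSet {α β : Type} [DecidableEq α] : List (α × β) → α → β → List (α × β)
  | [], x, v => [(x, v)]
  | p :: r, x, v => if p.1 = x then (x, v) :: r else p :: alSet r x v

-- ===== PORT A =====
-- body of A's inner loop; `PySem.Int.truncdiv ts 1000000000` is int(ts / TS_DIVISION_FACTOR),
-- exact here since |ts| ≤ 2^31 < 2^53
def stepA (ret : List (Int × List (String × Int))) (wc : String) (ts : Int) :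
    List (Int × List (String × Int)) :=
  let t := PySem.Int.truncdiv ts 1000000000
  let ret := if (alGet? ret t).isSome then ret else alSet ret t []
  let inner := (alGet? ret t).getD []
  let inner := if (alGet? inner wc).isSome then inner else alSet inner wc 0
  let inner := alSet inner wc ((alGet? inner wc).getD 0 + 1)
  alSet ret t inner

def count_dict (wc_ts_dict : List (String × List (Int × Int))) : (List (Int × List (String × Int))) × List String :=
  (wc_ts_dict.foldl (fun ret p => p.2.foldl (fun ret q => stepA ret p.1 q.1) ret) [],
   wc_ts_dict.map (fun p => p.1))

-- ===== PORT B =====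
-- pass 1 body: flat[key] = flat.get(key, 0) + 1
def stepB (d : PySem.Dict (Int × String) Int) (wc : String) (ts : Int) : PySem.Dict (Int × String) Int :=
  let key := (PySem.Int.truncdiv ts 1000000000, wc)
  d.insert key (d.getD key 0 + 1)

-- pass 2 body: if t not in ret: ret[t] = {}; ret[t][wc] = c
def reshapeStep (ret : List (Int × List (String × Int))) (p : (Int × String) × Int) :
    List (Int × List (String × Int)) :=
  let ret := if (alGet? ret p.1.1).isSome then ret else alSet ret p.1.1 []
  let inner := (alGet? ret p.1.1).getD []
  alSet ret p.1.1 (alSet inner p.1.2 p.2)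

def count_dict_alt (wc_ts_dict : List (String × List (Int × Int))) : (List (Int × List (String × Int))) × List String :=
  let flat := wc_ts_dict.foldl (fun d p => p.2.foldl (fun d q => stepB d p.1 q.1) d) PySem.Dict.empty
  (flat.items.foldl reshapeStep [], wc_ts_dict.map (fun p => p.1))

-- ===== PRECONDITION & SPEC =====
def Spec_count_dict (wc_ts_dict : List (String × List (Int × Int))) (out : (List (Int × List (String × Int))) × List String) : Prop := out = count_dict_alt wc_ts_dict
instance (wc_ts_dict : List (String × List (Int × Int))) (out : (List (Int × List (String × Int))) × List String) : Decidable (Spec_count_dict wc_ts_dict out) := by unfold Spec_count_dict; infer_instance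

-- ===== CLAIM (what is proved, stated in full; the proofs are below) =====
def Claim_equal_count_dict : Prop := ∀ (wc_ts_dict : List (String × List (Int × Int))), Dom_count_dict wc_ts_dict → Spec_count_dict wc_ts_dict (count_dict wc_ts_dict)

-- ===== LEMMAS AND PROOFS =====

-- the common sequence of (scaled_ts, wc) keys both passes iterate over
def keysOf (wc_ts_dict : List (String × List (Int × Int))) : List (Int × String) :=
  wc_ts_dict.flatMap (fun p => p.2.map (fun q => (PySem.Int.truncdiv q.1 1000000000, p.1)))

def stepK (ret : List (Int × List (String × Int))) (k : Int × String) :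
    List (Int × List (String × Int)) :=
  let ret := if (alGet? ret k.1).isSome then ret else alSet ret k.1 []
  let inner := (alGet? ret k.1).getD []
  let inner := if (alGet? inner k.2).isSome then inner else alSet inner k.2 0
  let inner := alSet inner k.2 ((alGet? inner k.2).getD 0 + 1)
  alSet ret k.1 inner

-- the common characterisation both sides are reduced to
def Fof (ks : List (Int × String)) (t : Int) : List (String × Int) :=
  ((PySem.Set.ofList ks).filter (fun k => decide (k.1 = t))).map
    (fun k => (k.2, (ks.count k : Int)))

def SpecN (ks : List (Int × String)) : List (Int × List (String × Int)) :=
  (PySem.Set.ofList (ks.map Prod.fst)).map (fun t => (t, Fof ks t))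

-- ---- generic assoc-list lemmas ----
theorem alGet?_of_not_mem {α β : Type} [DecidableEq α] (L : List (α × β)) (x : α)
    (h : x ∉ L.map Prod.fst) : alGet? L x = none := by
  induction L with
  | nil => rfl
  | cons p r ih =>
    simp only [List.map_cons, List.mem_cons] at h
    push_neg at h
    simp [alGet?, Ne.symm h.1, ih h.2]

theorem alSet_of_not_mem {α β : Type} [DecidableEq α] (L : List (α × β)) (x : α) (v : β)
    (h : x ∉ L.map Prod.fst) : alSet L x v = L ++ [(x, v)] := by
  induction L with
  | nil => rfl
  | cons p r ih =>
    simp only [List.map_cons, List.mem_cons] at h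
    push_neg at h
    simp [alSet, Ne.symm h.1, ih h.2]

theorem alGet?_append_of_not_mem {α β : Type} [DecidableEq α] (L L' : List (α × β)) (x : α)
    (h : x ∉ L.map Prod.fst) : alGet? (L ++ L') x = alGet? L' x := by
  induction L with
  | nil => rfl
  | cons p r ih =>
    simp only [List.map_cons, List.mem_cons] at h
    push_neg at h
    simp [alGet?, Ne.symm h.1, ih h.2]

theorem alSet_append_of_not_mem {α β : Type} [DecidableEq α] (L L' : List (α × β)) (x : α) (v : β)
    (h : x ∉ L.map Prod.fst) : alSet (L ++ L') x v = L ++ alSet L' x v := by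
  induction L with
  | nil => rfl
  | cons p r ih =>
    simp only [List.map_cons, List.mem_cons] at h
    push_neg at h
    simp [alSet, Ne.symm h.1, ih h.2]

theorem alGet?_map_of_not_mem {γ α β : Type} [DecidableEq α] (l : List γ) (key : γ → α)
    (val : γ → β) (x : α) (h : x ∉ l.map key) :
    alGet? (l.map (fun a => (key a, val a))) x = none := by
  apply alGet?_of_not_mem
  simpa [List.map_map, Function.comp] using h

theorem alGet?_map_of_mem {γ α β : Type} [DecidableEq α] (l : List γ) (key : γ → α)
    (val : γ → β) (a0 : γ) (ha : a0 ∈ l) (hnd : (l.map key).Nodup) :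
    alGet? (l.map (fun a => (key a, val a))) (key a0) = some (val a0) := by
  induction l with
  | nil => cases ha
  | cons b r ih =>
    simp only [List.map_cons, List.nodup_cons] at hnd
    rcases List.mem_cons.1 ha with h | h
    · subst h; simp [alGet?]
    · have hne : key b ≠ key a0 := fun he => hnd.1 (he ▸ List.mem_map_of_mem h)
      simp [alGet?, hne, ih h hnd.2]

theorem alSet_map_of_mem {γ α β : Type} [DecidableEq α] (l : List γ) (key : γ → α)
    (val : γ → β) (a0 : γ) (v : β) (ha : a0 ∈ l) (hnd : (l.map key).Nodup) :
    alSet (l.map (fun a => (key a, val a))) (key a0) v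
      = l.map (fun a => (key a, if key a = key a0 then v else val a)) := by
  induction l with
  | nil => cases ha
  | cons b r ih =>
    simp only [List.map_cons, List.nodup_cons] at hnd
    rcases List.mem_cons.1 ha with h | h
    · subst h
      simp only [List.map_cons, alSet, if_true]
      congr 1
      refine (List.map_congr_left ?_).symm
      intro a hmem
      have hne : key a ≠ key a0 := fun he => hnd.1 (he ▸ List.mem_map_of_mem hmem)
      simp [hne]
    · have hne : key b ≠ key a0 := fun he => hnd.1 (he ▸ List.mem_map_of_mem h)
      simp [alSet, hne, ih h hnd.2]

-- ---- PySem.Set facts ----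
theorem ofList_append_singleton {α : Type} [BEq α] [LawfulBEq α] (l : List α) (x : α) :
    PySem.Set.ofList (l ++ [x])
      = if x ∈ l then PySem.Set.ofList l else PySem.Set.ofList l ++ [x] := by
  have : PySem.Set.ofList (l ++ [x]) = PySem.Set.add (PySem.Set.ofList l) x := by
    simp [PySem.Set.ofList, List.foldl_append]
  rw [this]
  unfold PySem.Set.add
  by_cases h : x ∈ l
  · rw [if_pos, if_pos h]
    have : x ∈ PySem.Set.ofList l := (PySem.Set.mem_ofList l x).2 h
    simpa [List.contains_iff_mem] using this
  · rw [if_neg, if_neg h]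
    have : x ∉ PySem.Set.ofList l := fun hc => h ((PySem.Set.mem_ofList l x).1 hc)
    simpa [List.contains_iff_mem] using this

theorem ofList_map_ofList {α β : Type} [BEq α] [LawfulBEq α] [BEq β] [LawfulBEq β]
    (l : List α) (f : α → β) :
    PySem.Set.ofList ((PySem.Set.ofList l).map f) = PySem.Set.ofList (l.map f) := by
  induction l using List.reverseRecOn with
  | nil => rfl
  | append_singleton l x ih =>
    rw [ofList_append_singleton, List.map_append, List.map_singleton, ofList_append_singleton]
    by_cases h : x ∈ l
    · rw [if_pos h, if_pos (List.mem_map_of_mem h), ih]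
    · rw [if_neg h, List.map_append, List.map_singleton, ofList_append_singleton, ih]
      by_cases h2 : f x ∈ l.map f
      · rw [if_pos, if_pos h2]
        simpa [PySem.Set.mem_ofList] using h2
      · rw [if_neg, if_neg h2]
        simpa [PySem.Set.mem_ofList] using h2

-- ---- reshape characterisation (L1) ----
theorem count_int_append_singleton (l : List (Int × String)) (a b : Int × String) :
    (((l ++ [b]).count a : Nat) : Int)
      = ((l.count a : Nat) : Int) + if a = b then 1 else 0 := by
  rw [List.count_append, List.count_singleton]
  by_cases h : a = b
  · subst h; simp
  · simp [h, Ne.symm h]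

theorem reshape_eq (L : List ((Int × String) × Int)) (hnd : (L.map Prod.fst).Nodup) :
    L.foldl reshapeStep []
      = (PySem.Set.ofList (L.map (fun p => p.1.1))).map (fun t =>
          (t, (L.filter (fun p => decide (p.1.1 = t))).map (fun p => (p.1.2, p.2)))) := by
  induction L using List.reverseRecOn with
  | nil => rfl
  | append_singleton L p ih =>
    rw [List.map_append] at hnd
    rcases List.nodup_append.1 hnd with ⟨hndL, -, hdisj⟩
    have hp : p.1 ∉ L.map Prod.fst := by
      intro hmem
      exact hdisj p.1 hmem p.1 (List.mem_singleton.2 rfl) rfl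
    rw [List.foldl_concat, ih hndL, List.map_append]
    simp only [List.map_singleton]
    rw [ofList_append_singleton]
    have hfst : ((PySem.Set.ofList (L.map fun q => q.1.1)).map
        (fun t => (t, (L.filter (fun q => decide (q.1.1 = t))).map (fun q => (q.1.2, q.2))))).map
          Prod.fst = PySem.Set.ofList (L.map fun q => q.1.1) := by
      rw [List.map_map]; exact List.map_id' _
    by_cases ht : p.1.1 ∈ L.map (fun q => q.1.1)
    · -- scaled timestamp already present
      rw [if_pos ht]
      have htS : p.1.1 ∈ PySem.Set.ofList (L.map fun q => q.1.1) :=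
        (PySem.Set.mem_ofList _ _).2 ht
      have hS1nd : ((PySem.Set.ofList (L.map fun q => q.1.1)).map (fun t => t)).Nodup := by
        simpa using PySem.Set.nodup_ofList (L.map fun q => q.1.1)
      have hget := alGet?_map_of_mem (PySem.Set.ofList (L.map fun q => q.1.1)) (fun t => t)
        (fun t => (L.filter (fun q => decide (q.1.1 = t))).map (fun q => (q.1.2, q.2)))
        p.1.1 htS hS1nd
      have hwc : p.1.2 ∉ ((L.filter (fun q => decide (q.1.1 = p.1.1))).map
          (fun q => (q.1.2, q.2))).map Prod.fst := by
        intro hmem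
        rw [List.map_map] at hmem
        obtain ⟨q, hq, he⟩ := List.mem_map.1 hmem
        have hq' := List.mem_filter.1 hq
        have h1 : q.1.1 = p.1.1 := of_decide_eq_true hq'.2
        have hqp : q.1 = p.1 := Prod.ext_iff.2 ⟨h1, he⟩
        exact hp (hqp ▸ List.mem_map_of_mem hq'.1)
      simp only [reshapeStep, hget, Option.isSome_some, if_true, Option.getD_some]
      rw [alSet_of_not_mem _ _ _ hwc,
        alSet_map_of_mem _ (fun t => t) _ p.1.1 _ htS hS1nd]
      refine List.map_congr_left ?_
      intro t htmem
      by_cases he : t = p.1.1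
      · subst he
        simp only [if_pos rfl, List.filter_append, List.map_append]
        congr 1
        simp [List.filter, alGet?]
      · rw [if_neg he, List.filter_append]
        have : [p].filter (fun q => decide (q.1.1 = t)) = [] := by
          simp [Ne.symm he]
        rw [this, List.append_nil]
    · -- new scaled timestamp
      rw [if_neg ht]
      have ht' : p.1.1 ∉ PySem.Set.ofList (L.map fun q => q.1.1) :=
        fun h => ht ((PySem.Set.mem_ofList _ _).1 h)
      have hget : alGet? ((PySem.Set.ofList (L.map fun q => q.1.1)).map
          (fun t => (t, (L.filter (fun q => decide (q.1.1 = t))).map (fun q => (q.1.2, q.2)))))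
            p.1.1 = none :=
        alGet?_map_of_not_mem _ (fun t => t) _ _ (by simpa using ht')
      have h2 : p.1.1 ∉ ((PySem.Set.ofList (L.map fun q => q.1.1)).map
          (fun t => (t, (L.filter (fun q => decide (q.1.1 = t))).map
            (fun q => (q.1.2, q.2))))).map Prod.fst := by
        rw [hfst]; exact ht'
      simp only [reshapeStep, hget, Option.isSome_none, Bool.false_eq_true, if_false]
      rw [alSet_of_not_mem _ _ _ h2, alGet?_append_of_not_mem _ _ _ h2,
        alSet_append_of_not_mem _ _ _ _ h2, List.map_append]
      congr 1
      · refine List.map_congr_left ?_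
        intro t htmem
        have htne : t ≠ p.1.1 := by
          intro he
          exact ht (he ▸ (PySem.Set.mem_ofList _ _).1 htmem)
        rw [List.filter_append]
        have : [p].filter (fun q => decide (q.1.1 = t)) = [] := by
          simp [Ne.symm htne]
        rw [this, List.append_nil]
      · have hLnil : L.filter (fun q => decide (q.1.1 = p.1.1)) = [] := by
          rw [List.filter_eq_nil_iff]
          intro q hq
          simp only [decide_eq_true_eq]
          exact fun h => ht (h ▸ List.mem_map_of_mem hq)
        simp [alGet?, alSet, List.filter_append, hLnil, List.filter]

-- ---- nested-build characterisation (L2) ----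
theorem Fof_ne (ks : List (Int × String)) (k : Int × String) (t : Int) (htne : t ≠ k.1) :
    Fof (ks ++ [k]) t = Fof ks t := by
  unfold Fof
  rw [ofList_append_singleton]
  have hfilt : ∀ S : List (Int × String),
      (S.filter (fun q => decide (q.1 = t))).map
          (fun q => (q.2, (((ks ++ [k]).count q : Nat) : Int)))
        = (S.filter (fun q => decide (q.1 = t))).map
          (fun q => (q.2, ((ks.count q : Nat) : Int))) := by
    intro S
    refine List.map_congr_left ?_
    intro q hq
    have hq1 : q.1 = t := of_decide_eq_true (List.mem_filter.1 hq).2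
    have hne : q ≠ k := fun he => htne (by rw [← hq1, he])
    rw [count_int_append_singleton, if_neg hne, add_zero]
  by_cases hk : k ∈ ks
  · rw [if_pos hk]
    exact hfilt _
  · rw [if_neg hk, List.filter_append]
    have hnil : [k].filter (fun q => decide (q.1 = t)) = [] := by
      simp [Ne.symm htne]
    rw [hnil, List.append_nil]
    exact hfilt _

theorem specN_step (ks : List (Int × String)) (k : Int × String) :
    stepK (SpecN ks) k = SpecN (ks ++ [k]) := by
  have hS1nd : ((PySem.Set.ofList (ks.map Prod.fst)).map (fun t => t)).Nodup := by
    simpa using PySem.Set.nodup_ofList (ks.map Prod.fst)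
  have hmapfst : (ks ++ [k]).map Prod.fst = ks.map Prod.fst ++ [k.1] := by
    rw [List.map_append]; rfl
  have eR : SpecN (ks ++ [k]) = (PySem.Set.ofList (ks.map Prod.fst ++ [k.1])).map
      (fun t => (t, Fof (ks ++ [k]) t)) := by
    unfold SpecN; rw [hmapfst]
  by_cases ht : k.1 ∈ ks.map Prod.fst
  · -- scaled timestamp already present
    have htS : k.1 ∈ PySem.Set.ofList (ks.map Prod.fst) := (PySem.Set.mem_ofList _ _).2 ht
    have hget : alGet? (SpecN ks) k.1 = some (Fof ks k.1) := by
      unfold SpecN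
      exact alGet?_map_of_mem _ (fun t => t) (Fof ks) k.1 htS hS1nd
    have e4 : ∀ X, alSet (SpecN ks) k.1 X
        = (PySem.Set.ofList (ks.map Prod.fst)).map
            (fun t => (t, if t = k.1 then X else Fof ks t)) := by
      intro X
      unfold SpecN
      exact alSet_map_of_mem _ (fun t => t) (Fof ks) k.1 X htS hS1nd
    by_cases hk : k ∈ ks
    · -- full key already present: only its count is bumped
      have hkS : k ∈ (PySem.Set.ofList ks).filter (fun q => decide (q.1 = k.1)) :=
        List.mem_filter.2 ⟨(PySem.Set.mem_ofList _ _).2 hk, by simp⟩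
      have hfnd : (((PySem.Set.ofList ks).filter (fun q => decide (q.1 = k.1))).map
          (fun q => q.2)).Nodup := by
        refine List.Nodup.map_on ?_ ((PySem.Set.nodup_ofList ks).filter _)
        intro x hx y hy he
        have hx1 : x.1 = k.1 := of_decide_eq_true (List.mem_filter.1 hx).2
        have hy1 : y.1 = k.1 := of_decide_eq_true (List.mem_filter.1 hy).2
        exact Prod.ext_iff.2 ⟨hx1.trans hy1.symm, he⟩
      have hg2 : alGet? (Fof ks k.1) k.2 = some ((ks.count k : Nat) : Int) := by
        unfold Fof
        exact alGet?_map_of_mem _ (fun q => q.2)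
          (fun q => ((ks.count q : Nat) : Int)) k hkS hfnd
      have e3 : alSet (Fof ks k.1) k.2 (((ks.count k : Nat) : Int) + 1)
          = ((PySem.Set.ofList ks).filter (fun q => decide (q.1 = k.1))).map
              (fun q => (q.2, if q.2 = k.2 then ((ks.count k : Nat) : Int) + 1
                else ((ks.count q : Nat) : Int))) := by
        unfold Fof
        exact alSet_map_of_mem _ (fun q => q.2)
          (fun q => ((ks.count q : Nat) : Int)) k _ hkS hfnd
      simp only [stepK, hget, Option.isSome_some, if_true, Option.getD_some, hg2]
      rw [e3, e4 _, eR, ofList_append_singleton, if_pos ht]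
      refine List.map_congr_left ?_
      intro t htmem
      by_cases he : t = k.1
      · subst he
        rw [if_pos rfl]
        have hF : Fof (ks ++ [k]) k.1
            = ((PySem.Set.ofList ks).filter (fun q => decide (q.1 = k.1))).map
                (fun q => (q.2, if q.2 = k.2 then ((ks.count k : Nat) : Int) + 1
                  else ((ks.count q : Nat) : Int))) := by
          unfold Fof
          rw [ofList_append_singleton, if_pos hk]
          refine List.map_congr_left ?_
          intro q hq
          have hq1 : q.1 = k.1 := of_decide_eq_true (List.mem_filter.1 hq).2
          rw [count_int_append_singleton]
          by_cases hqk : q.2 = k.2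
          · have hqk' : q = k := Prod.ext_iff.2 ⟨hq1, hqk⟩
            rw [if_pos hqk', if_pos hqk, hqk']
          · have hqk' : q ≠ k := fun he2 => hqk (by rw [he2])
            rw [if_neg hqk', add_zero, if_neg hqk]
        rw [hF]
      · rw [if_neg he, Fof_ne ks k t he]
    · -- new workload class under an existing scaled timestamp
      have hc0 : ks.count k = 0 := List.count_eq_zero.2 hk
      have hwc : k.2 ∉ (Fof ks k.1).map Prod.fst := by
        intro hmem
        unfold Fof at hmem
        rw [List.map_map] at hmem
        obtain ⟨q, hq, he⟩ := List.mem_map.1 hmem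
        have hq' := List.mem_filter.1 hq
        have h1 : q.1 = k.1 := of_decide_eq_true hq'.2
        have hqk : q = k := Prod.ext_iff.2 ⟨h1, he⟩
        exact hk (hqk ▸ (PySem.Set.mem_ofList _ _).1 hq'.1)
      have hg2 : alGet? (Fof ks k.1) k.2 = none := alGet?_of_not_mem _ _ hwc
      simp only [stepK, hget, Option.isSome_some, if_true, Option.getD_some, hg2,
        Option.isSome_none, Bool.false_eq_true, if_false]
      rw [alSet_of_not_mem _ _ _ hwc, alGet?_append_of_not_mem _ _ _ hwc,
        alSet_append_of_not_mem _ _ _ _ hwc]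
      have einner : alSet [(k.2, (0 : Int))] k.2 ((alGet? [(k.2, (0 : Int))] k.2).getD 0 + 1)
          = [(k.2, (1 : Int))] := by
        simp [alGet?, alSet]
      rw [einner, e4 _, eR, ofList_append_singleton, if_pos ht]
      refine List.map_congr_left ?_
      intro t htmem
      by_cases he : t = k.1
      · subst he
        rw [if_pos rfl]
        have hF : Fof (ks ++ [k]) k.1 = Fof ks k.1 ++ [(k.2, (1 : Int))] := by
          unfold Fof
          rw [ofList_append_singleton, if_neg hk, List.filter_append, List.map_append]
          congr 1
          · refine List.map_congr_left ?_
            intro q hq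
            have hqk : q ≠ k := fun he2 =>
              hk (he2 ▸ (PySem.Set.mem_ofList _ _).1 (List.mem_filter.1 hq).1)
            rw [count_int_append_singleton, if_neg hqk, add_zero]
          · simp [List.filter, count_int_append_singleton, hc0]
        rw [hF]
      · rw [if_neg he, Fof_ne ks k t he]
  · -- new scaled timestamp
    have hknotin : k ∉ ks := fun h => ht (List.mem_map_of_mem h)
    have hc0 : ks.count k = 0 := List.count_eq_zero.2 hknotin
    have ht' : k.1 ∉ PySem.Set.ofList (ks.map Prod.fst) :=
      fun h => ht ((PySem.Set.mem_ofList _ _).1 h)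
    have hget : alGet? (SpecN ks) k.1 = none := by
      unfold SpecN
      exact alGet?_map_of_not_mem _ (fun t => t) _ _ (by simpa using ht')
    have h2 : k.1 ∉ (SpecN ks).map Prod.fst := by
      have hfst : (SpecN ks).map Prod.fst = PySem.Set.ofList (ks.map Prod.fst) := by
        unfold SpecN; rw [List.map_map]; exact List.map_id' _
      rw [hfst]; exact ht'
    have hLnil : (PySem.Set.ofList ks).filter (fun q => decide (q.1 = k.1)) = [] := by
      rw [List.filter_eq_nil_iff]
      intro q hq
      simp only [decide_eq_true_eq]
      intro hq1
      exact ht (hq1 ▸ List.mem_map_of_mem ((PySem.Set.mem_ofList _ _).1 hq))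
    have hFk : Fof (ks ++ [k]) k.1 = [(k.2, (1 : Int))] := by
      unfold Fof
      rw [ofList_append_singleton, if_neg hknotin, List.filter_append, hLnil]
      simp [List.filter, count_int_append_singleton, hc0]
    simp only [stepK, hget, Option.isSome_none, Bool.false_eq_true, if_false]
    rw [alSet_of_not_mem _ _ _ h2, alGet?_append_of_not_mem _ _ _ h2,
      alSet_append_of_not_mem _ _ _ _ h2,
      eR, ofList_append_singleton, if_neg ht, List.map_append]
    congr 1
    · unfold SpecN
      refine List.map_congr_left ?_
      intro t htmem
      have htne : t ≠ k.1 := fun he => ht (he ▸ (PySem.Set.mem_ofList _ _).1 htmem)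
      rw [Fof_ne ks k t htne]
    · rw [List.map_singleton, hFk]
      simp [alGet?, alSet]

theorem nest_eq (ks : List (Int × String)) : ks.foldl stepK [] = SpecN ks := by
  induction ks using List.reverseRecOn with
  | nil => rfl
  | append_singleton ks k ih => rw [List.foldl_concat, ih, specN_step]

-- ---- the two ports reduce to folds over keysOf ----
theorem a_fold_eq (wc_ts_dict : List (String × List (Int × Int))) :
    wc_ts_dict.foldl (fun ret p => p.2.foldl (fun ret q => stepA ret p.1 q.1) ret) []
      = (keysOf wc_ts_dict).foldl stepK [] := by
  suffices h : ∀ (L : List (String × List (Int × Int))) (init : List (Int × List (String × Int))),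
      L.foldl (fun ret p => p.2.foldl (fun ret q => stepA ret p.1 q.1) ret) init
        = (keysOf L).foldl stepK init from h wc_ts_dict []
  intro L
  induction L with
  | nil => intro init; rfl
  | cons p L ih =>
    intro init
    simp only [List.foldl_cons, keysOf, List.flatMap_cons, List.foldl_append, List.foldl_map]
    rw [← keysOf, ih]
    rfl

theorem b_flat_eq (wc_ts_dict : List (String × List (Int × Int))) :
    wc_ts_dict.foldl (fun d p => p.2.foldl (fun d q => stepB d p.1 q.1) d) PySem.Dict.empty
      = PySem.Dict.counter (keysOf wc_ts_dict) := by
  rw [← PySem.Dict.foldl_insert_getD_add_one_eq_counter]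
  suffices h : ∀ (L : List (String × List (Int × Int))) (init : PySem.Dict (Int × String) Int),
      L.foldl (fun d p => p.2.foldl (fun d q => stepB d p.1 q.1) d) init
        = (keysOf L).foldl (fun d x => d.insert x (d.getD x 0 + 1)) init from h wc_ts_dict _
  intro L
  induction L with
  | nil => intro init; rfl
  | cons p L ih =>
    intro init
    simp only [List.foldl_cons, keysOf, List.flatMap_cons, List.foldl_append, List.foldl_map]
    rw [← keysOf, ih]
    rfl

theorem main_eq (ks : List (Int × String)) :
    ks.foldl stepK [] = (PySem.Dict.counter ks).items.foldl reshapeStep [] := by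
  rw [PySem.Dict.items_counter, nest_eq, reshape_eq]
  · have e1 : ((PySem.Set.ofList ks).map (fun k => (k, (ks.count k : Int)))).map
        (fun p => p.1.1) = (PySem.Set.ofList ks).map Prod.fst := by
      rw [List.map_map]; rfl
    rw [e1, ofList_map_ofList]
    unfold SpecN
    refine List.map_congr_left ?_
    intro t _
    rw [List.filter_map, List.map_map]
    rfl
  · rw [List.map_map]
    have e2 : (PySem.Set.ofList ks).map
        (Prod.fst ∘ fun k : Int × String => (k, (ks.count k : Int)))
          = PySem.Set.ofList ks := List.map_id' _
    rw [e2]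
    exact PySem.Set.nodup_ofList ks

-- ===== VERDICT (by name: the statement is the Claim_ definition above) =====
theorem count_dict_spec : Claim_equal_count_dict := by
  intro wc_ts_dict _
  unfold Spec_count_dict count_dict count_dict_alt
  rw [a_fold_eq, b_flat_eq, main_eq]
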